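-- pv_equiv track=rewrite | github.com/naveenkumar150307/Phishing_detection | src/content_layer.py | _within_org
-- ===== SOURCE A (Python) =====
-- from typing import Tuple, Dict, Any, List, Optional
--
-- def _within_org(hostname: str, org_domains: Optional[List[str]]) -> bool:
--     if not hostname or not org_domains:
--         return False
--     h = hostname.lower()
--     for root in org_domains:
--         r = root.lstrip('.') .lower()
--         if h == r or h.endswith('.' + r):
--             return True
--     return False
-- ===== SOURCE B (Python) =====
-- from typing import List, Optional
--
-- def _within_org(hostname: str, org_domains: Optional[List[str]]) -> bool:
--     if not hostname or not org_domains: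
--         return False
--     h = hostname.lower()
--     roots = {root.lstrip('.').lower() for root in org_domains}
--     return h in roots or any(
--         h[i + 1:] in roots for i, c in enumerate(h) if c == '.'
--     )
-- ===== Notes on version B (the rewrite author's own statement) =====
-- stated objective: idiomatic
-- what changed: B normalizes the org domains once into a set and tests the hostname's dot-cut suffixes for membership, instead of scanning every domain with endswith; per-hostname work becomes O(|h| * lookup) independent of the number of domains.
import Mathlib
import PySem

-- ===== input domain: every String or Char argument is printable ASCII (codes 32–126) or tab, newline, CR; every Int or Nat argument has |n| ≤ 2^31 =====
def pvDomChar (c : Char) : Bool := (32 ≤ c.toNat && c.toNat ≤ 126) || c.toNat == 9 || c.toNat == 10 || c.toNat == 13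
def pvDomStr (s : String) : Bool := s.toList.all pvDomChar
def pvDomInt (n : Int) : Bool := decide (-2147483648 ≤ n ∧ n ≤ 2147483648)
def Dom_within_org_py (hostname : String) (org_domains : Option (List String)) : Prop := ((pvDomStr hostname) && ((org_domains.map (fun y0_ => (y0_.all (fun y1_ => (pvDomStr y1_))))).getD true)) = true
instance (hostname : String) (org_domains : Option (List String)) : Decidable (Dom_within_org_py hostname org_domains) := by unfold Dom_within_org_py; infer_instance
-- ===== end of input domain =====

-- B replaces A's per-domain endswith scan by one normalized set of roots probed with the
-- hostname's dot-cut suffixes (objective: idiomatic; same observable behaviour).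

-- ===== PORT A =====
-- hand port of str.lstrip('.'): drops the leading '.' characters (exact)
def pvLstripDot (cs : List Char) : List Char := cs.dropWhile (· == '.')

-- the 'for root in org_domains' loop with its early return
def pvAScan (h : List Char) : List String → Bool
  | [] => false
  | root :: rest =>
      let r := PySem.Chars.lower (pvLstripDot root.toList)
      if h == r || PySem.Chars.endswith h ('.' :: r) then true else pvAScan h rest

def within_org_py (hostname : String) (org_domains : Option (List String)) : Bool :=
  if hostname.toList.isEmpty || (org_domains.getD []).isEmpty then false
  else pvAScan (PySem.Chars.lower hostname.toList) (org_domains.getD [])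

-- ===== PORT B =====
-- [h[i+1:] for i, c in enumerate(h) if c == '.'] : the suffix after each '.', left to right (exact)
def pvDotSuffixes : List Char → List (List Char)
  | [] => []
  | c :: t => if c == '.' then t :: pvDotSuffixes t else pvDotSuffixes t

def within_org_py_alt (hostname : String) (org_domains : Option (List String)) : Bool :=
  if hostname.toList.isEmpty || (org_domains.getD []).isEmpty then false
  else
    let h := PySem.Chars.lower hostname.toList
    let roots : PySem.Set (List Char) :=
      PySem.Set.ofList ((org_domains.getD []).map
        (fun root => PySem.Chars.lower (pvLstripDot root.toList)))
    decide (h ∈ roots) || (pvDotSuffixes h).any (fun s => decide (s ∈ roots))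

-- ===== PRECONDITION & SPEC =====
def Spec_within_org_py (hostname : String) (org_domains : Option (List String)) (out : Bool) : Prop := out = within_org_py_alt hostname org_domains
instance (hostname : String) (org_domains : Option (List String)) (out : Bool) : Decidable (Spec_within_org_py hostname org_domains out) := by unfold Spec_within_org_py; infer_instance

-- ===== CLAIM (what is proved, stated in full; the proofs are below) =====
def Claim_equal_within_org_py : Prop := ∀ (hostname : String) (org_domains : Option (List String)), Dom_within_org_py hostname org_domains → Spec_within_org_py hostname org_domains (within_org_py hostname org_domains)

-- ===== LEMMAS AND PROOFS =====

theorem pvAScan_eq_true_iff (h : List Char) (ds : List String) :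
    pvAScan h ds = true ↔
      ∃ root ∈ ds, h = PySem.Chars.lower (pvLstripDot root.toList) ∨
        ('.' :: PySem.Chars.lower (pvLstripDot root.toList)) <:+ h := by
  induction ds with
  | nil => simp [pvAScan]
  | cons root rest ih =>
      simp only [pvAScan, List.mem_cons]
      split_ifs with hc
      · simp only [Bool.or_eq_true, beq_iff_eq, PySem.Chars.endswith_iff] at hc
        exact iff_of_true rfl ⟨root, Or.inl rfl, hc⟩
      · simp only [Bool.or_eq_true, beq_iff_eq, PySem.Chars.endswith_iff, not_or] at hc
        rw [ih]
        constructor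
        · rintro ⟨r, hr, hm⟩; exact ⟨r, Or.inr hr, hm⟩
        · rintro ⟨r, hr, hm⟩
          rcases hr with rfl | hr
          · rcases hm with hm | hm
            · exact absurd hm hc.1
            · exact absurd hm hc.2
          · exact ⟨r, hr, hm⟩

theorem mem_pvDotSuffixes (h r : List Char) :
    r ∈ pvDotSuffixes h ↔ ('.' :: r) <:+ h := by
  induction h with
  | nil => simp [pvDotSuffixes]
  | cons c t ih =>
      simp only [pvDotSuffixes, List.suffix_cons_iff]
      split_ifs with hc
      · simp only [beq_iff_eq] at hc
        subst hc
        simp only [List.mem_cons, ih, List.cons.injEq]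
        constructor
        · rintro (rfl | hs)
          · exact Or.inl ⟨trivial, rfl⟩
          · exact Or.inr hs
        · rintro (⟨-, rfl⟩ | hs)
          · exact Or.inl rfl
          · exact Or.inr hs
        
      · simp only [beq_iff_eq] at hc
        rw [ih]
        constructor
        · exact Or.inr
        · intro hx
          rcases hx with h1 | hs
          · injection h1 with e1 _
            exact absurd e1.symm hc
          · exact hs

-- ===== VERDICT (by name: the statement is the Claim_ definition above) =====
theorem within_org_py_spec : Claim_equal_within_org_py := by
  intro hostname org_domains _
  unfold Spec_within_org_py within_org_py within_org_py_alt
  split_ifs with hg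
  · rfl
  · rw [Bool.eq_iff_iff]
    simp only [Bool.or_eq_true, decide_eq_true_eq, List.any_eq_true,
      PySem.Set.mem_ofList, List.mem_map, pvAScan_eq_true_iff]
    constructor
    · rintro ⟨root, hr, hm | hm⟩
      · exact Or.inl ⟨root, hr, hm.symm⟩
      · exact Or.inr ⟨_, (mem_pvDotSuffixes _ _).mpr hm, root, hr, rfl⟩
    · rintro (⟨root, hr, hm⟩ | ⟨s, hs, root, hr, rfl⟩)
      · exact ⟨root, hr, Or.inl hm.symm⟩
      · exact ⟨root, hr, Or.inr ((mem_pvDotSuffixes _ _).mp hs)⟩
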